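-- pv_equiv track=rewrite | github.com/Milan-Rosko/proofcase | theories/T003/python/gen.py | unpair_value
-- ===== SOURCE A (Python) =====
-- from typing import Dict, Iterable, List, Sequence, Tuple
--
-- def _fib_weights(width: int) -> List[int]:
--     """Return [F2, F3, ..., F_{width+1}] with F2=1, F3=2."""
--     if width <= 0:
--         return []
--     out = [1]
--     if width == 1:
--         return out
--     out.append(2)
--     for _ in range(2, width):
--         out.append(out[-1] + out[-2])
--     return out
--
-- def _max_zeck(width: int) -> int:
--     if width <= 0:
--         return 0
--     f = [0, 1]
--     for _ in range(width + 2):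
--         f.append(f[-1] + f[-2])
--     return f[width + 2] - 1
--
-- def zeck_encode(n: int, width: int) -> List[int]:
--     if n < 0:
--         raise ValueError("zeck_encode expects nonnegative n")
--     if n > _max_zeck(width):
--         raise ValueError(f"n={n} is out of range for zeck width={width}")
--
--     ws = _fib_weights(width)
--     ds = [0] * width
--     rem = n
--     for i in range(width - 1, -1, -1):
--         w = ws[i]
--         if w <= rem:
--             if i + 1 < width and ds[i + 1] == 1:
--                 continue
--             ds[i] = 1
--             rem -= w
--     if rem != 0:
--         raise ValueError(f"failed Zeckendorf encoding for n={n}, width={width}")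
--     return ds
--
-- def zeck_decode(ds: Sequence[int]) -> int:
--     ws = _fib_weights(len(ds))
--     acc = 0
--     for d, w in zip(ds, ws):
--         acc += int(d) * w
--     return acc
--
-- def unpair_value(z: int, width: int) -> tuple[int, int]:
--     if width < 4 or width % 4 != 0:
--         raise ValueError("unpair_value requires width divisible by 4 and >= 4")
--     lane = width // 4
--     dz = zeck_encode(z, width)
--     dx = [dz[4 * i] for i in range(lane)]
--     dy = [dz[4 * i + 2] for i in range(lane)]
--     return zeck_decode(dx), zeck_decode(dy)
-- ===== SOURCE B (Python) =====
-- def unpair_value(z: int, width: int) -> tuple[int, int]: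
--     if width < 4 or width % 4 != 0:
--         raise ValueError("unpair_value requires width divisible by 4 and >= 4")
--     # single weight table ws[i] = F(i+2) (F2=1, F3=2); max Zeckendorf value = ws[-1] + ws[-2] - 1
--     ws = [1, 2]
--     for _ in range(width - 2):
--         ws.append(ws[-1] + ws[-2])
--     if z < 0:
--         raise ValueError("zeck_encode expects nonnegative n")
--     if z > ws[-1] + ws[-2] - 1:
--         raise ValueError(f"n={z} is out of range for zeck width={width}")
--     # one fused greedy pass: no digit list, no lane sublists; lane weight of bit i is ws[i // 4]
--     rem, x, y = z, 0, 0
--     prev = False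
--     for i in range(width - 1, -1, -1):
--         if ws[i] <= rem and not prev:
--             rem -= ws[i]
--             if i % 4 == 0:
--                 x += ws[i // 4]
--             elif i % 4 == 2:
--                 y += ws[i // 4]
--             prev = True
--         else:
--             prev = False
--     if rem != 0:
--         raise ValueError(f"failed Zeckendorf encoding for n={z}, width={width}")
--     return x, y
-- ===== Notes on version B (the rewrite author's own statement) =====
-- stated objective: faster
-- what changed: B replaces A's pipeline (separate max-Zeckendorf fib table, full digit-list greedy encode, two lane-sublist extractions, two zip-decode passes) with one weight table plus a single fused greedy pass that accumulates the two lane values x and y directly, never materialising the digit list or lane lists.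
import Mathlib
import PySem

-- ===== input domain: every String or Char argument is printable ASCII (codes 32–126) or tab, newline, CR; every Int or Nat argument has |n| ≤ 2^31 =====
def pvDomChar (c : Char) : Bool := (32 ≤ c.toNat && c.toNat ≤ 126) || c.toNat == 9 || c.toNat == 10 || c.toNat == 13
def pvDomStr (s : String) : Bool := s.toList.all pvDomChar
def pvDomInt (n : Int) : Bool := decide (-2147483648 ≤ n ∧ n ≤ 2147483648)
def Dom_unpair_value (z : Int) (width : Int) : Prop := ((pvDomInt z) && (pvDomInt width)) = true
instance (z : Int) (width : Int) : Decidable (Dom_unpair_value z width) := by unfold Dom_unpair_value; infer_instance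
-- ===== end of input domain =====

-- B fuses A's three passes (digit list, two lane sublists, two decodes) into one greedy loop that accumulates
-- the two lane values directly; equal return values proved on Pre_ (where the Python A returns).

-- ===== PORT A =====

-- out.append(out[-1] + out[-2]); at every call site out has ≥ 2 elements, so getD (len-1)/(len-2) is exact for out[-1]/out[-2]
def pyFibAppendA (out : List Int) : List Int :=
  out ++ [out.getD (out.length - 1) 0 + out.getD (out.length - 2) 0]

def fibWeightsA (width : Int) : List Int :=
  if width ≤ 0 then []
  else if width = 1 then [1]
  else (PySem.List.pyRange 2 width 1).foldl (fun out _ => pyFibAppendA out) [1, 2]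

def maxZeckA (width : Int) : Int :=
  if width ≤ 0 then 0
  else
    let f := (PySem.List.pyRange 0 (width + 2) 1).foldl (fun f _ => pyFibAppendA f) [0, 1]
    -- f[width + 2]: index is nonnegative and < f.length here, so toNat + getD is exact
    f.getD (width + 2).toNat 0 - 1

-- for i in range(width-1, -1, -1): counter i+1 processes index i
def encodeLoop (width : Nat) (ws : List Int) : Nat → List Int → Int → List Int × Int
  | 0, ds, rem => (ds, rem)
  | i + 1, ds, rem =>
    let w := ws.getD i 0
    if w ≤ rem then
      if i + 1 < width ∧ ds.getD (i + 1) 0 = 1 then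
        encodeLoop width ws i ds rem
      else
        encodeLoop width ws i (ds.set i 1) (rem - w)
    else
      encodeLoop width ws i ds rem

-- zeck_encode: none = ValueError (n < 0, n out of range, or leftover remainder)
def zeckEncode (n : Int) (width : Int) : Option (List Int) :=
  if n < 0 then none
  else if n > maxZeckA width then none
  else
    let ws := fibWeightsA width
    let r := encodeLoop width.toNat ws width.toNat (List.replicate width.toNat 0) n
    if r.2 ≠ 0 then none else some r.1

def zeckDecode (ds : List Int) : Int :=
  (ds.zip (fibWeightsA (ds.length : Int))).foldl (fun acc p => acc + p.1 * p.2) 0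

def unpair_value (z : Int) (width : Int) : Int × Int :=
  if width < 4 ∨ PySem.Int.mod width 4 ≠ 0 then (0, 0)   -- ValueError; outside Pre_
  else
    let lane := (PySem.Int.floordiv width 4).toNat
    match zeckEncode z width with
    | none => (0, 0)                                      -- ValueError; outside Pre_
    | some dz =>
      -- dz[4*i] / dz[4*i+2]: indices in range here, so getD is exact
      (zeckDecode ((List.range lane).map (fun i => dz.getD (4 * i) 0)),
       zeckDecode ((List.range lane).map (fun i => dz.getD (4 * i + 2) 0)))

-- ===== PORT B =====

-- ws.append(ws[-1] + ws[-2]); ws always has ≥ 2 elements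
def bFibGrow (out : List Int) : List Int :=
  out ++ [out.getD (out.length - 1) 0 + out.getD (out.length - 2) 0]

-- the fused greedy pass: state (rem, x, y, prev), counter i+1 processes index i
def altLoop (ws : List Int) : Nat → Int → Int → Int → Bool → Int × Int × Int
  | 0, rem, x, y, _ => (rem, x, y)
  | i + 1, rem, x, y, prev =>
    if ws.getD i 0 ≤ rem ∧ prev = false then
      if i % 4 = 0 then altLoop ws i (rem - ws.getD i 0) (x + ws.getD (i / 4) 0) y true
      else if i % 4 = 2 then altLoop ws i (rem - ws.getD i 0) x (y + ws.getD (i / 4) 0) true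
      else altLoop ws i (rem - ws.getD i 0) x y true
    else altLoop ws i rem x y false

def unpair_value_alt (z : Int) (width : Int) : Int × Int :=
  if width < 4 ∨ PySem.Int.mod width 4 ≠ 0 then (0, 0)    -- ValueError; outside Pre_
  else
    let ws := (List.range (width.toNat - 2)).foldl (fun out _ => bFibGrow out) [1, 2]
    if z < 0 then (0, 0)                                   -- ValueError; outside Pre_
    else if z > ws.getD (ws.length - 1) 0 + ws.getD (ws.length - 2) 0 - 1 then (0, 0)  -- ValueError
    else
      let r := altLoop ws width.toNat z 0 0 false
      if r.1 ≠ 0 then (0, 0)                               -- ValueError (never reached on Pre_)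
      else (r.2.1, r.2.2)

-- ===== PRECONDITION & SPEC =====
-- Pre_ = exactly where the Python A returns: width a positive multiple of 4 and 0 ≤ z ≤ F(width+2) - 1
def Pre_unpair_value (z : Int) (width : Int) : Prop :=
  4 ≤ width ∧ width % 4 = 0 ∧ 0 ≤ z ∧ z ≤ (Nat.fib (width.toNat + 2) : Int) - 1
instance (z : Int) (width : Int) : Decidable (Pre_unpair_value z width) := by
  unfold Pre_unpair_value; infer_instance
def pvWitness_unpair_value : Int × Int := (5, 8)

def Spec_unpair_value (z : Int) (width : Int) (out : Int × Int) : Prop := out = unpair_value_alt z width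
instance (z : Int) (width : Int) (out : Int × Int) : Decidable (Spec_unpair_value z width out) := by unfold Spec_unpair_value; infer_instance

-- ===== CLAIM (what is proved, stated in full; the proofs are below) =====
def Claim_equal_unpair_value : Prop := ∀ (z : Int) (width : Int), Dom_unpair_value z width → Pre_unpair_value z width → Spec_unpair_value z width (unpair_value z width)

-- ===== LEMMAS AND PROOFS =====

-- Zeckendorf weight W j = F(j+2) and the reference weight lists
def W (j : Nat) : Int := (Nat.fib (j + 2) : Int)
def wlist (n : Nat) : List Int := (List.range n).map W
def flist (n : Nat) : List Int := (List.range n).map (fun j => (Nat.fib j : Int))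

def pairSum (f g : Nat → Int) : Nat → Int
  | 0 => 0
  | l + 1 => pairSum f g l + f l * g l

def SxTo (ws : List Int) : Nat → List Int → Int
  | 0, _ => 0
  | i + 1, ds => SxTo ws i ds + (if i % 4 = 0 then ds.getD i 0 * ws.getD (i / 4) 0 else 0)

def SyTo (ws : List Int) : Nat → List Int → Int
  | 0, _ => 0
  | i + 1, ds => SyTo ws i ds + (if i % 4 = 2 then ds.getD i 0 * ws.getD (i / 4) 0 else 0)

lemma length_wlist (n : Nat) : (wlist n).length = n := by simp [wlist]

lemma getD_wlist {n k : Nat} (h : k < n) : (wlist n).getD k 0 = W k := by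
  simp [wlist, List.getD, h]

lemma length_flist (n : Nat) : (flist n).length = n := by simp [flist]

lemma getD_flist {n k : Nat} (h : k < n) : (flist n).getD k 0 = (Nat.fib k : Int) := by
  simp [flist, List.getD, h]

lemma grow_wlist {n : Nat} (h : 2 ≤ n) : pyFibAppendA (wlist n) = wlist (n + 1) := by
  have h1 : n - 1 < n := by omega
  have h2 : n - 2 < n := by omega
  simp only [pyFibAppendA, length_wlist, getD_wlist h1, getD_wlist h2]
  have : wlist (n + 1) = wlist n ++ [W n] := by
    simp [wlist, List.range_succ]
  rw [this]
  congr 1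
  simp only [W]
  have e1 : n - 1 + 2 = n + 1 := by omega
  have e2 : n - 2 + 2 = n := by omega
  rw [e1, e2]
  have e3 : Nat.fib (n + 2) = Nat.fib n + Nat.fib (n + 1) := Nat.fib_add_two
  simp only [List.cons.injEq, and_true]
  push_cast [e3]
  omega

lemma grow_flist {n : Nat} (h : 2 ≤ n) : pyFibAppendA (flist n) = flist (n + 1) := by
  have h1 : n - 1 < n := by omega
  have h2 : n - 2 < n := by omega
  simp only [pyFibAppendA, length_flist, getD_flist h1, getD_flist h2]
  have : flist (n + 1) = flist n ++ [(Nat.fib n : Int)] := by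
    simp [flist, List.range_succ]
  rw [this]
  congr 1
  have e : n = (n - 2) + 2 := by omega
  rw [e, Nat.fib_add_two]
  have e1 : n - 2 + 1 = n - 1 := by omega
  simp only [List.cons.injEq, and_true]
  push_cast [e1]
  omega

lemma foldl_const {α β : Type} (g : β → β) : ∀ (l : List α) (init : β),
    l.foldl (fun o _ => g o) init = g^[l.length] init := by
  intro l
  induction l with
  | nil => intro init; simp
  | cons a t ih => intro init; simp [List.foldl, ih, Function.iterate_succ_apply]

lemma iter_grow_wlist : ∀ (k n : Nat), 2 ≤ n → pyFibAppendA^[k] (wlist n) = wlist (n + k) := by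
  intro k
  induction k with
  | zero => intro n _; simp
  | succ k ih =>
    intro n hn
    rw [Function.iterate_succ_apply, grow_wlist hn, ih (n + 1) (by omega)]
    ring_nf

lemma iter_grow_flist : ∀ (k n : Nat), 2 ≤ n → pyFibAppendA^[k] (flist n) = flist (n + k) := by
  intro k
  induction k with
  | zero => intro n _; simp
  | succ k ih =>
    intro n hn
    rw [Function.iterate_succ_apply, grow_flist hn, ih (n + 1) (by omega)]
    ring_nf

lemma wlist_two : wlist 2 = [1, 2] := by decide

lemma flist_two : flist 2 = [0, 1] := by decide

lemma fibWeightsA_eq (w : Int) : fibWeightsA w = wlist w.toNat := by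
  unfold fibWeightsA
  split_ifs with h0 h1
  · have : w.toNat = 0 := by omega
    simp [this, wlist]
  · have : w.toNat = 1 := by omega
    rw [this]; decide
  · have h2 : 2 ≤ w := by omega
    rw [foldl_const, PySem.List.length_pyRange_one, ← wlist_two,
      iter_grow_wlist _ 2 (le_refl 2)]
    congr 1
    omega

lemma bWeights_eq (w : Nat) (h : 2 ≤ w) :
    (List.range (w - 2)).foldl (fun out _ => bFibGrow out) [1, 2] = wlist w := by
  have hb : bFibGrow = pyFibAppendA := rfl
  rw [hb, foldl_const, List.length_range, ← wlist_two, iter_grow_wlist _ 2 (le_refl 2)]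
  congr 1
  omega

lemma maxZeckA_eq (w : Int) (h : 1 ≤ w) : maxZeckA w = (Nat.fib (w.toNat + 2) : Int) - 1 := by
  unfold maxZeckA
  rw [if_neg (by omega)]
  rw [foldl_const, PySem.List.length_pyRange_one, ← flist_two,
    iter_grow_flist _ 2 (le_refl 2)]
  have e : (w + 2 - 0).toNat = w.toNat + 2 := by omega
  rw [e]
  show (flist (2 + (w.toNat + 2))).getD ((w + 2).toNat) 0 - 1 = (Nat.fib (w.toNat + 2) : Int) - 1
  have e2 : (w + 2).toNat = w.toNat + 2 := by omega
  rw [e2, getD_flist (by omega)]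

lemma encodeLoop_getD_ge (width : Nat) (ws : List Int) :
    ∀ (i : Nat) (ds : List Int) (rem : Int) (k : Nat), i ≤ k →
      ((encodeLoop width ws i ds rem).1).getD k 0 = ds.getD k 0 := by
  intro i
  induction i with
  | zero => intro ds rem k _; simp [encodeLoop]
  | succ i ih =>
    intro ds rem k hk
    simp only [encodeLoop]
    split_ifs with h1 h2
    · exact ih ds rem k (by omega)
    · rw [ih _ _ k (by omega)]
      simp [List.getD, List.getElem?_set_ne (by omega : i ≠ k)]
    · exact ih ds rem k (by omega)

lemma loop_inv (width : Nat) (ws : List Int) :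
    ∀ (i : Nat) (ds : List Int) (rem x y : Int),
      ds.length = width → i ≤ width →
      (∀ k, k < i → ds.getD k 0 = 0) →
      altLoop ws i rem x y (decide (ds.getD i 0 = 1)) =
        ((encodeLoop width ws i ds rem).2,
         x + SxTo ws i (encodeLoop width ws i ds rem).1,
         y + SyTo ws i (encodeLoop width ws i ds rem).1) := by
  intro i
  induction i with
  | zero =>
    intro ds rem x y _ _ _
    simp [altLoop, encodeLoop, SxTo, SyTo]
  | succ i ih =>
    intro ds rem x y hlen hle hk
    have hi1 : i + 1 ≤ ds.length := by omega
    have hgi : ds.getD i 0 = 0 := hk i (by omega)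
    by_cases hw : ws.getD i 0 ≤ rem
    · by_cases hd : ds.getD (i + 1) 0 = 1
      · -- previous digit set: both sides skip index i
        have hlt : i + 1 < width := by
          by_contra hc
          have : ds.getD (i + 1) 0 = 0 := List.getD_eq_default _ _ (by omega)
          omega
        have hprev : (decide (ds.getD (i + 1) 0 = 1)) = true := decide_eq_true hd
        rw [hprev]
        simp only [altLoop, encodeLoop]
        rw [if_neg (by simp), if_pos hw, if_pos (show _ ∧ _ from ⟨hlt, hd⟩)]
        have hfalse : false = decide (ds.getD i 0 = 1) :=
          (decide_eq_false (by rw [hgi]; decide)).symm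
        rw [hfalse, ih ds rem x y hlen (by omega) (fun k hk' => hk k (by omega))]
        have hpres : ((encodeLoop width ws i ds rem).1)[i]?.getD 0 = 0 := by
          have := encodeLoop_getD_ge width ws i ds rem i (le_refl i)
          rw [List.getD] at this; rw [this]; exact hgi
        simp [SxTo, SyTo, hpres]
      · -- digit i gets set
        have hprev : (decide (ds.getD (i + 1) 0 = 1)) = false := decide_eq_false hd
        rw [hprev]
        simp only [altLoop, encodeLoop]
        rw [if_pos (show _ ∧ _ from ⟨hw, trivial⟩), if_pos hw, if_neg (show ¬(i + 1 < width ∧ ds.getD (i + 1) 0 = 1) from fun hc => hd hc.2)]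
        have hset : ((ds.set i 1).getD i 0) = 1 := by
          have : i < ds.length := by omega
          simp [List.getD, List.getElem?_set_eq_of_lt _ this]
        have htrue : true = decide ((ds.set i 1).getD i 0 = 1) := (decide_eq_true hset).symm
        have hk2 : ∀ k, k < i → (ds.set i 1).getD k 0 = 0 := by
          intro k hk'
          rw [List.getD, List.getElem?_set_ne (by omega : i ≠ k)]
          exact hk k (by omega)
        have hpres : ((encodeLoop width ws i (ds.set i 1) (rem - ws.getD i 0)).1)[i]?.getD 0 = 1 := by
          have := encodeLoop_getD_ge width ws i (ds.set i 1) (rem - ws.getD i 0) i (le_refl i)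
          rw [List.getD] at this; rw [this]; exact hset
        simp only [List.getD_eq_getElem?_getD] at hpres
        by_cases h4 : i % 4 = 0
        · rw [if_pos h4, htrue,
            ih (ds.set i 1) (rem - ws.getD i 0) (x + ws.getD (i / 4) 0) y (by simp [hlen]) (by omega) hk2]
          simp [SxTo, SyTo, hpres, h4]
          all_goals ring
        · by_cases h42 : i % 4 = 2
          · rw [if_neg h4, if_pos h42, htrue,
              ih (ds.set i 1) (rem - ws.getD i 0) x (y + ws.getD (i / 4) 0) (by simp [hlen]) (by omega) hk2]
            simp [SxTo, SyTo, hpres, h42]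
            all_goals ring
          · rw [if_neg h4, if_neg h42, htrue,
              ih (ds.set i 1) (rem - ws.getD i 0) x y (by simp [hlen]) (by omega) hk2]
            simp [SxTo, SyTo, h4, h42]
    · -- weight too large: both skip
      simp only [altLoop, encodeLoop]
      rw [if_neg (fun hc => hw hc.1), if_neg hw]
      have hfalse : false = decide (ds.getD i 0 = 1) :=
        (decide_eq_false (by rw [hgi]; decide)).symm
      rw [hfalse, ih ds rem x y hlen (by omega) (fun k hk' => hk k (by omega))]
      have hpres : ((encodeLoop width ws i ds rem).1)[i]?.getD 0 = 0 := by
        have := encodeLoop_getD_ge width ws i ds rem i (le_refl i)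
        rw [List.getD] at this; rw [this]; exact hgi
      simp [SxTo, SyTo, hpres]

lemma fold_zip_map_range (f g : Nat → Int) :
    ∀ (l : Nat) (init : Int),
      ((((List.range l).map f).zip ((List.range l).map g)).foldl (fun a p => a + p.1 * p.2) init)
        = init + pairSum f g l := by
  intro l
  induction l with
  | zero => intro init; simp [pairSum]
  | succ l ih =>
    intro init
    rw [List.range_succ]
    simp only [List.map_append, List.map_cons, List.map_nil]
    rw [List.zip_append (by simp)]
    rw [List.foldl_append]
    simp [ih, pairSum]
    omega

lemma SxTo_succ (w : List Int) (n : Nat) (ds : List Int) :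
    SxTo w (n + 1) ds = SxTo w n ds + (if n % 4 = 0 then ds.getD n 0 * w.getD (n / 4) 0 else 0) := rfl

lemma SyTo_succ (w : List Int) (n : Nat) (ds : List Int) :
    SyTo w (n + 1) ds = SyTo w n ds + (if n % 4 = 2 then ds.getD n 0 * w.getD (n / 4) 0 else 0) := rfl

lemma SxTo_lane (m : Nat) (ds : List Int) :
    ∀ l : Nat, l ≤ m →
      SxTo (wlist m) (4 * l) ds = pairSum (fun j => ds.getD (4 * j) 0) W l := by
  intro l
  induction l with
  | zero => intro _; rw [Nat.mul_zero]; rfl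
  | succ l ih =>
    intro hlm
    rw [show 4 * (l + 1) = (4 * l + 3) + 1 from by omega, SxTo_succ,
        show 4 * l + 3 = (4 * l + 2) + 1 from by omega, SxTo_succ,
        show 4 * l + 2 = (4 * l + 1) + 1 from by omega, SxTo_succ,
        show 4 * l + 1 = (4 * l) + 1 from by omega, SxTo_succ]
    rw [ih (by omega)]
    have hdiv : 4 * l / 4 = l := by omega
    simp only [show 4 * l % 4 = 0 from by omega,
      show (4 * l + 1) % 4 = 1 from by omega,
      show (4 * l + 1 + 1) % 4 = 2 from by omega,
      show (4 * l + 1 + 1 + 1) % 4 = 3 from by omega, hdiv]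
    rw [getD_wlist (show l < m from by omega)]
    simp [pairSum]

lemma SyTo_lane (m : Nat) (ds : List Int) :
    ∀ l : Nat, l ≤ m →
      SyTo (wlist m) (4 * l) ds = pairSum (fun j => ds.getD (4 * j + 2) 0) W l := by
  intro l
  induction l with
  | zero => intro _; rw [Nat.mul_zero]; rfl
  | succ l ih =>
    intro hlm
    rw [show 4 * (l + 1) = (4 * l + 3) + 1 from by omega, SyTo_succ,
        show 4 * l + 3 = (4 * l + 2) + 1 from by omega, SyTo_succ,
        show 4 * l + 2 = (4 * l + 1) + 1 from by omega, SyTo_succ,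
        show 4 * l + 1 = (4 * l) + 1 from by omega, SyTo_succ]
    rw [ih (by omega)]
    have hdiv : (4 * l + 1 + 1) / 4 = l := by omega
    simp only [show 4 * l % 4 = 0 from by omega,
      show (4 * l + 1) % 4 = 1 from by omega,
      show (4 * l + 1 + 1) % 4 = 2 from by omega,
      show (4 * l + 1 + 1 + 1) % 4 = 3 from by omega, hdiv]
    rw [getD_wlist (show l < m from by omega)]
    simp [pairSum]

lemma decode_lane_x (w' lane : Nat) (h : 4 * lane = w') (ds : List Int) :
    zeckDecode ((List.range lane).map (fun i => ds.getD (4 * i) 0)) = SxTo (wlist w') w' ds := by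
  unfold zeckDecode
  rw [List.length_map, List.length_range, fibWeightsA_eq,
    show ((lane : Int)).toNat = lane from by omega,
    show wlist lane = (List.range lane).map W from rfl,
    fold_zip_map_range, ← h, SxTo_lane (4 * lane) ds lane (by omega)]
  simp

lemma decode_lane_y (w' lane : Nat) (h : 4 * lane = w') (ds : List Int) :
    zeckDecode ((List.range lane).map (fun i => ds.getD (4 * i + 2) 0)) = SyTo (wlist w') w' ds := by
  unfold zeckDecode
  rw [List.length_map, List.length_range, fibWeightsA_eq,
    show ((lane : Int)).toNat = lane from by omega,
    show wlist lane = (List.range lane).map W from rfl,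
    fold_zip_map_range, ← h, SyTo_lane (4 * lane) ds lane (by omega)]
  simp

lemma main_eq (z width : Int) : unpair_value z width = unpair_value_alt z width := by
  unfold unpair_value unpair_value_alt
  by_cases hpre : width < 4 ∨ PySem.Int.mod width 4 ≠ 0
  · rw [if_pos hpre, if_pos hpre]
  · rw [if_neg hpre, if_neg hpre]
    have hp1 : ¬ width < 4 := fun h => hpre (Or.inl h)
    have hp2 : PySem.Int.mod width 4 = 0 := not_not.mp fun h => hpre (Or.inr h)
    have hmod : width % 4 = 0 := by
      rw [← PySem.Int.mod_eq_emod_of_pos (by omega : (0:Int) < 4)]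
      exact hp2
    have hfd : PySem.Int.floordiv width 4 = width / 4 :=
      PySem.Int.floordiv_eq_ediv_of_pos (by omega)
    set w' := width.toNat with hw'
    have hw4 : 4 ≤ w' := by omega
    set lane := (PySem.Int.floordiv width 4).toNat with hlanedef
    have hlane : 4 * lane = w' := by rw [hlanedef, hfd]; omega
    rw [bWeights_eq w' (by omega)]
    unfold zeckEncode
    rw [fibWeightsA_eq, maxZeckA_eq width (by omega)]
    simp only []
    rw [length_wlist, getD_wlist (show w' - 1 < w' from by omega),
      getD_wlist (show w' - 2 < w' from by omega)]
    have hmax : W (w' - 1) + W (w' - 2) - 1 = (Nat.fib (w' + 2) : Int) - 1 := by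
      simp only [W]
      rw [show w' - 1 + 2 = w' + 1 from by omega, show w' - 2 + 2 = w' from by omega]
      have e3 : Nat.fib (w' + 2) = Nat.fib w' + Nat.fib (w' + 1) := Nat.fib_add_two
      push_cast [e3]
      ring
    rw [hmax]
    by_cases hz : z < 0
    · rw [if_pos hz, if_pos hz]
    · rw [if_neg hz, if_neg hz]
      by_cases hzm : z > (Nat.fib (w' + 2) : Int) - 1
      · rw [if_pos hzm, if_pos hzm]
      · rw [if_neg hzm, if_neg hzm]
        have hrep : ∀ k, k < w' → (List.replicate w' (0 : Int)).getD k 0 = 0 := by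
          intro k hk; simp [List.getD]
        have hprev0 : (false : Bool) = decide ((List.replicate w' (0 : Int)).getD w' 0 = 1) := by
          simp [List.getD]
        rw [hprev0, loop_inv w' (wlist w') w' (List.replicate w' 0) z 0 0
          (by simp) (le_refl w') hrep]
        by_cases hrem : (encodeLoop w' (wlist w') w' (List.replicate w' 0) z).2 ≠ 0
        · rw [if_pos hrem]
          simp only [if_pos hrem]
        · rw [if_neg hrem]
          simp only [if_neg hrem]
          rw [decode_lane_x w' lane hlane, decode_lane_y w' lane hlane]
          simp [← hw']

-- ===== VERDICT (by name: the statement is the Claim_ definition above) =====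
theorem unpair_value_spec : Claim_equal_unpair_value := by
  intro z width _ _
  unfold Spec_unpair_value
  exact main_eq z width
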